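-- pv_equiv track=rewrite | github.com/Robert123-prog/F_Prog | Laborator/Lab2/EX6.py | check_domino_vect
-- ===== SOURCE A (Python) =====
-- def check_domino(nr1, nr2):
--
--     if nr1 % 10 == (nr2 // 10) % 10:
--         return True
--
--     return False
--
-- def check_domino_vect(vect):
--     lg = 1
--     lgmax = 1
--
--     for i in range(len(vect) - 1):
--
--         if check_domino(vect[i], vect[i + 1]) == True:
--             lg += 1
--
--         else:
--             lg = 1
--
--         if lg > lgmax:
--             lgmax = lg
--
--     return lgmax
-- ===== SOURCE B (Python) =====
-- def check_domino(nr1, nr2):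
--
--     if nr1 % 10 == (nr2 // 10) % 10:
--         return True
--
--     return False
--
-- def check_domino_vect(vect):
--     matches = [check_domino(vect[i], vect[i + 1]) for i in range(len(vect) - 1)]
--     runs = []
--     for b in matches:
--         if runs and runs[-1][0] == b:
--             runs[-1][1] += 1
--         else:
--             runs.append([b, 1])
--     best = max((n for b, n in runs if b), default=0)
--     return best + 1
-- ===== Notes on version B (the rewrite author's own statement) =====
-- stated objective: alternative
-- what changed: A's single fused loop carrying a current-run counter and a running maximum is replaced by three distinctly-shaped passes: build the list of pairwise domino matches, group it into run-length-encoded runs, then take the max over the true-run lengths (default 0) plus one.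
import Mathlib
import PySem

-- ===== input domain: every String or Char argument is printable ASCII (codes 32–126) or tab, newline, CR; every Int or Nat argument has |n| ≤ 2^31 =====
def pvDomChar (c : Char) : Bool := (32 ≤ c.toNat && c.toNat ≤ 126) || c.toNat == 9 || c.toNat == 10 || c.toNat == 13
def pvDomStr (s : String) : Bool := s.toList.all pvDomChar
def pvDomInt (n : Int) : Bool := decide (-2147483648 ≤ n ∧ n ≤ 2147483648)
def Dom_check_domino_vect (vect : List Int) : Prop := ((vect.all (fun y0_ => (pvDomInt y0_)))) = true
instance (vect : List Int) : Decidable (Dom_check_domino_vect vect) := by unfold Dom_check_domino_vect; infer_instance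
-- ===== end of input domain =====

-- B splits A's fused counter loop into three shaped passes — a pairwise-match table, a
-- run-length grouping pass, and a max over the true-run lengths; same linear cost ("alternative").

-- ===== PORT A =====
-- shared helper (identical source in Source A and Source B)
def check_domino (nr1 nr2 : Int) : Bool :=
  if PySem.Int.mod nr1 10 == PySem.Int.mod (PySem.Int.floordiv nr2 10) 10 then true
  else false

def check_domino_vect (vect : List Int) : Int :=
  -- lg = 1; lgmax = 1; for i in range(len(vect)-1): …  (indices are always in range)
  let st := (PySem.List.pyRange 0 (PySem.List.len vect - 1) 1).foldl
    (fun (st : Int × Int) i =>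
      let lg := if check_domino (PySem.List.pyGetD vect i 0) (PySem.List.pyGetD vect (i + 1) 0) == true
                then st.1 + 1 else 1
      let lgmax := if lg > st.2 then lg else st.2
      (lg, lgmax)) (1, 1)
  st.2

-- ===== PORT B =====
-- 'if runs and runs[-1][0] == b: runs[-1][1] += 1 else: runs.append([b, 1])'
def addRun : List (Bool × Int) → Bool → List (Bool × Int)
  | [], b => [(b, 1)]
  | [(k, n)], b => if k == b then [(k, n + 1)] else [(k, n), (b, 1)]
  | p :: q :: rest, b => p :: addRun (q :: rest) b

def check_domino_vect_alt (vect : List Int) : Int :=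
  let matchTbl := (PySem.List.pyRange 0 (PySem.List.len vect - 1) 1).map
    (fun i => check_domino (PySem.List.pyGetD vect i 0) (PySem.List.pyGetD vect (i + 1) 0))
  let runs := matchTbl.foldl addRun []
  -- max((n for b, n in runs if b), default=0)
  let best := PySem.List.maxD (runs.filterMap (fun p => if p.1 then some p.2 else none)) (fun x => x) 0
  best + 1

-- ===== PRECONDITION & SPEC =====
def Spec_check_domino_vect (vect : List Int) (out : Int) : Prop := out = check_domino_vect_alt vect
instance (vect : List Int) (out : Int) : Decidable (Spec_check_domino_vect vect out) := by unfold Spec_check_domino_vect; infer_instance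

-- ===== CLAIM (what is proved, stated in full; the proofs are below) =====
def Claim_equal_check_domino_vect : Prop := ∀ (vect : List Int), Dom_check_domino_vect vect → Spec_check_domino_vect vect (check_domino_vect vect)

-- ===== LEMMAS AND PROOFS =====

-- proof-side vocabulary: leading true-run length and longest true-run length of a bool list
def leadTrue : List Bool → Int
  | [] => 0
  | true :: t => 1 + leadTrue t
  | false :: _ => 0

def maxRun : List Bool → Int
  | [] => 0
  | true :: t => max (1 + leadTrue t) (maxRun t)
  | false :: t => maxRun t

-- back-to-front run-length encoding (canonical form of B's forward grouping pass)
def groupRuns : List Bool → List (Bool × Int)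
  | [] => []
  | b :: t =>
    match groupRuns t with
    | [] => [(b, 1)]
    | (k, n) :: gs => if b == k then (k, n + 1) :: gs else (b, 1) :: (k, n) :: gs

def mergeRun (k : Bool) (n : Int) : List (Bool × Int) → List (Bool × Int)
  | [] => [(k, n)]
  | (k', n') :: gs => if k == k' then (k, n + n') :: gs else (k, n) :: (k', n') :: gs

def bestR : List (Bool × Int) → Int
  | [] => 0
  | p :: t => if p.1 then max p.2 (bestR t) else bestR t

-- A's loop body, named
def dstep (st : Int × Int) (b : Bool) : Int × Int :=
  let lg := if b == true then st.1 + 1 else 1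
  let lgmax := if lg > st.2 then lg else st.2
  (lg, lgmax)

theorem lead_le_maxRun : ∀ m : List Bool, 0 ≤ leadTrue m ∧ leadTrue m ≤ maxRun m := by
  intro m
  induction m with
  | nil => simp [leadTrue, maxRun]
  | cons b t ih => cases b <;> simp [leadTrue, maxRun] <;> omega

-- A's fold, characterised
theorem dstep_foldl : ∀ (m : List Bool) (lg lgmax : Int), 1 ≤ lg → lg ≤ lgmax →
    (m.foldl dstep (lg, lgmax)).2 = max lgmax (max (lg + leadTrue m) (maxRun m + 1)) := by
  intro m
  induction m with
  | nil =>
    intro lg lgmax h1 h2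
    simp [leadTrue, maxRun]
    omega
  | cons b t ih =>
    intro lg lgmax h1 h2
    have hlt := lead_le_maxRun t
    cases b with
    | true =>
      have hs : dstep (lg, lgmax) true = (lg + 1, max lgmax (lg + 1)) := by
        simp [dstep]; omega
      rw [List.foldl_cons, hs, ih (lg + 1) (max lgmax (lg + 1)) (by omega) (le_max_right _ _)]
      simp [leadTrue, maxRun]
      omega
    | false =>
      have hs : dstep (lg, lgmax) false = (1, max lgmax 1) := by
        simp [dstep]; omega
      rw [List.foldl_cons, hs, ih 1 (max lgmax 1) le_rfl (le_max_right _ _)]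
      simp [leadTrue, maxRun]
      omega

theorem addRun_ne_nil : ∀ (l : List (Bool × Int)) (b : Bool), addRun l b ≠ [] := by
  intro l b
  match l with
  | [] => simp [addRun]
  | [(k, n)] => simp only [addRun]; split <;> simp
  | p :: q :: rest => simp [addRun]

-- the grouping fold never touches runs in front of the last one
theorem foldl_addRun_keep : ∀ (t : List Bool) (p q : Bool × Int) (rest : List (Bool × Int)),
    List.foldl addRun (p :: q :: rest) t = p :: List.foldl addRun (q :: rest) t := by
  intro t
  induction t with
  | nil => intro p q rest; rfl
  | cons c s ih =>
    intro p q rest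
    rw [List.foldl_cons, List.foldl_cons]
    have h1 : addRun (p :: q :: rest) c = p :: addRun (q :: rest) c := rfl
    rw [h1]
    cases hc : addRun (q :: rest) c with
    | nil => exact absurd hc (addRun_ne_nil _ _)
    | cons q' rest' => exact ih p q' rest'

theorem mergeRun_one : ∀ (b : Bool) (t : List Bool), mergeRun b 1 (groupRuns t) = groupRuns (b :: t) := by
  intro b t
  simp only [groupRuns]
  cases hg : groupRuns t with
  | nil => rfl
  | cons p gs =>
    obtain ⟨k', n'⟩ := p
    by_cases hk : b = k'
    · subst hk; simp [mergeRun]; ring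
    · simp [mergeRun, hk]

theorem groupRuns_head_key : ∀ (b : Bool) (t : List Bool),
    ∃ n gs, groupRuns (b :: t) = (b, n) :: gs := by
  intro b t
  simp only [groupRuns]
  cases groupRuns t with
  | nil => exact ⟨1, [], rfl⟩
  | cons p gs =>
    obtain ⟨k', n'⟩ := p
    by_cases hk : b = k'
    · subst hk; simp
    · simp [hk]

theorem groupRuns_nil_iff : ∀ t : List Bool, groupRuns t = [] → t = [] := by
  intro t h
  cases t with
  | nil => rfl
  | cons b s =>
    obtain ⟨n, gs, hg⟩ := groupRuns_head_key b s
    rw [hg] at h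
    cases h

theorem foldl_addRun_merge : ∀ (m : List Bool) (k : Bool) (n : Int),
    List.foldl addRun [(k, n)] m = mergeRun k n (groupRuns m) := by
  intro m
  induction m with
  | nil => intro k n; rfl
  | cons b t ih =>
    intro k n
    by_cases hbk : b = k
    · subst hbk
      have hstep : addRun [(b, n)] b = [(b, n + 1)] := by simp [addRun]
      rw [List.foldl_cons, hstep, ih b (n + 1)]
      simp only [groupRuns]
      cases hg : groupRuns t with
      | nil => simp [mergeRun]
      | cons p gs =>
        obtain ⟨k', n'⟩ := p
        by_cases hk' : b = k'
        · subst hk'; simp [mergeRun]; ring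
        · simp [mergeRun, hk']
    · have hstep : addRun [(k, n)] b = [(k, n), (b, 1)] := by
        simp [addRun, Ne.symm hbk]
      rw [List.foldl_cons, hstep, foldl_addRun_keep, ih b 1, mergeRun_one]
      obtain ⟨n'', gs'', hg⟩ := groupRuns_head_key b t
      rw [hg]
      simp [mergeRun, Ne.symm hbk]

theorem foldl_addRun_nil : ∀ m : List Bool, List.foldl addRun [] m = groupRuns m := by
  intro m
  cases m with
  | nil => rfl
  | cons b t =>
    have h0 : addRun [] b = [(b, 1)] := rfl
    rw [List.foldl_cons, h0, foldl_addRun_merge, mergeRun_one]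

theorem groupRuns_head_lead : ∀ (t : List Bool) (k : Bool) (n : Int) (gs : List (Bool × Int)),
    groupRuns t = (k, n) :: gs → leadTrue t = (if k then n else 0) := by
  intro t
  induction t with
  | nil => intro k n gs h; simp [groupRuns] at h
  | cons c s ih =>
    intro k n gs h
    simp only [groupRuns] at h
    cases hg : groupRuns s with
    | nil =>
      rw [hg] at h
      have hs : s = [] := groupRuns_nil_iff s hg
      subst hs
      simp only [List.cons.injEq, Prod.mk.injEq] at h
      obtain ⟨⟨h1, h2⟩, -⟩ := h
      subst h1; subst h2
      cases c <;> simp [leadTrue]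
    | cons p gs' =>
      obtain ⟨k', n'⟩ := p
      rw [hg] at h
      have hlead := ih k' n' gs' hg
      by_cases hck : c = k'
      · subst hck
        simp only [BEq.rfl, if_true, List.cons.injEq, Prod.mk.injEq] at h
        obtain ⟨⟨h1, h2⟩, -⟩ := h
        subst h1; subst h2
        cases c <;> simp [leadTrue, hlead] at * <;> omega
      · simp only [beq_iff_eq, hck, if_false, List.cons.injEq, Prod.mk.injEq] at h
        obtain ⟨⟨h1, h2⟩, -⟩ := h
        subst h1; subst h2
        cases c with
        | true =>
          have hk' : k' = false := by
            cases k' with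
            | true => exact absurd rfl hck
            | false => rfl
          subst hk'
          simp [leadTrue, hlead]
        | false => simp [leadTrue]

theorem bestR_groupRuns : ∀ m : List Bool, bestR (groupRuns m) = maxRun m := by
  intro m
  induction m with
  | nil => rfl
  | cons b t ih =>
    cases hg : groupRuns t with
    | nil =>
      have ht := groupRuns_nil_iff t hg
      subst ht
      cases b <;> simp [groupRuns, bestR, maxRun, leadTrue]
    | cons p gs =>
      obtain ⟨k, n⟩ := p
      have hlead := groupRuns_head_lead t k n gs hg
      rw [hg] at ih
      simp only [groupRuns, hg]
      by_cases hbk : b = k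
      · subst hbk
        simp only [BEq.rfl, if_true]
        cases b <;> simp [maxRun, bestR, hg] at * <;> omega
      · simp only [beq_iff_eq, hbk, if_false]
        cases b <;> cases k <;> simp_all [maxRun, bestR, leadTrue]

theorem foldr_max_shift : ∀ (s : List Int) (a c : Int), s.foldr max (max a c) = max c (s.foldr max a) := by
  intro s
  induction s with
  | nil => intro a c; simp [max_comm]
  | cons d s' ih => intro a c; simp [List.foldr_cons, ih]; omega

theorem foldl_max_foldr : ∀ (t : List Int) (a : Int), t.foldl max a = t.foldr max a := by
  intro t
  induction t with
  | nil => intro a; rfl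
  | cons c s ih => intro a; rw [List.foldl_cons, ih, List.foldr_cons, foldr_max_shift]

theorem foldr_max_pull : ∀ (t : List Int) (a : Int), 0 ≤ a → t.foldr max a = max a (t.foldr max 0) := by
  intro t
  induction t with
  | nil => intro a ha; simp; omega
  | cons c s ih => intro a ha; simp [List.foldr_cons, ih a ha]; omega

theorem maxD_id_foldr : ∀ l : List Int, (∀ x ∈ l, 0 ≤ x) →
    PySem.List.maxD l (fun x => x) 0 = l.foldr max 0 := by
  intro l hl
  cases l with
  | nil => rfl
  | cons x t =>
    have h0 : 0 ≤ x := hl x (List.mem_cons_self)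
    simp [PySem.List.maxD, PySem.List.max?_id_cons, foldl_max_foldr, foldr_max_pull t x h0]

theorem bestR_filterMap : ∀ l : List (Bool × Int),
    (l.filterMap (fun p => if p.1 then some p.2 else none)).foldr max 0 = bestR l := by
  intro l
  induction l with
  | nil => rfl
  | cons p t ih =>
    obtain ⟨k, n⟩ := p
    cases k <;> simp [bestR, ih]

theorem groupRuns_pos : ∀ (m : List Bool) (p : Bool × Int), p ∈ groupRuns m → 1 ≤ p.2 := by
  intro m
  induction m with
  | nil => intro p h; simp [groupRuns] at h
  | cons b t ih =>
    intro p h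
    simp only [groupRuns] at h
    cases hg : groupRuns t with
    | nil =>
      rw [hg] at h
      simp at h
      subst h; simp
    | cons q gs =>
      obtain ⟨k', n'⟩ := q
      rw [hg] at h
      by_cases hk : b = k'
      · simp [hk] at h
        rcases h with h | h
        · subst h
          have hm : (k', n') ∈ groupRuns t := by rw [hg]; exact List.mem_cons_self
          have := ih (k', n') hm
          simp at this ⊢; omega
        · have hm : p ∈ groupRuns t := by rw [hg]; exact List.mem_cons_of_mem _ h
          exact ih p hm
      · simp [hk] at h
        rcases h with h | h
        · subst h; simp
        · have hm : p ∈ groupRuns t := by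
            rw [hg]
            rcases h with h | h
            · subst h; exact List.mem_cons_self
            · exact List.mem_cons_of_mem _ h
          exact ih p hm

-- ===== VERDICT (by name: the statement is the Claim_ definition above) =====
theorem check_domino_vect_spec : Claim_equal_check_domino_vect := by
  intro vect _
  unfold Spec_check_domino_vect
  have hA : check_domino_vect vect =
      (((PySem.List.pyRange 0 (PySem.List.len vect - 1) 1).map
        (fun i => check_domino (PySem.List.pyGetD vect i 0) (PySem.List.pyGetD vect (i + 1) 0))).foldl
        dstep (1, 1)).2 := by
    simp only [check_domino_vect]
    rw [List.foldl_map]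
    rfl
  have hpos : ∀ x ∈ (groupRuns ((PySem.List.pyRange 0 (PySem.List.len vect - 1) 1).map
        (fun i => check_domino (PySem.List.pyGetD vect i 0) (PySem.List.pyGetD vect (i + 1) 0)))).filterMap
        (fun p => if p.1 then some p.2 else none), (0:Int) ≤ x := by
    intro x hx
    simp only [List.mem_filterMap] at hx
    obtain ⟨p, hp, hpx⟩ := hx
    have := groupRuns_pos _ p hp
    by_cases h1 : p.1 <;> simp [h1] at hpx
    omega
  have hB : check_domino_vect_alt vect = bestR (groupRuns
      ((PySem.List.pyRange 0 (PySem.List.len vect - 1) 1).map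
        (fun i => check_domino (PySem.List.pyGetD vect i 0) (PySem.List.pyGetD vect (i + 1) 0)))) + 1 := by
    simp only [check_domino_vect_alt]
    rw [foldl_addRun_nil, maxD_id_foldr _ hpos, bestR_filterMap]
  rw [hA, hB, bestR_groupRuns, dstep_foldl _ 1 1 le_rfl le_rfl]
  have := lead_le_maxRun ((PySem.List.pyRange 0 (PySem.List.len vect - 1) 1).map
        (fun i => check_domino (PySem.List.pyGetD vect i 0) (PySem.List.pyGetD vect (i + 1) 0)))
  omega
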